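-- pv_equiv track=rewrite | github.com/osy0602/coding_test | baekjoon/1652.py | countHeight
-- ===== SOURCE A (Python) =====
-- def countHeight(arr, N):
--     num = 0
--
--     for i in range(N):
--         counting = True
--         for j in range(1, N):
--             if counting==False and arr[j][i] == 'X':
--                 counting = True
--             if counting and arr[j][i] == '.' and arr[j-1][i] == '.':
--                 num += 1
--                 counting = False
--     return num
-- ===== SOURCE B (Python) =====
-- def countHeight(arr, N):
--     if N < 2:
--         return 0
--     num = 0
--     for i in range(N):
--         col = ''.join(arr[j][i] for j in range(N))
--         num += sum('..' in seg for seg in col.split('X'))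
--     return num
-- ===== Notes on version B (the rewrite author's own statement) =====
-- stated objective: idiomatic
-- what changed: B replaces A's stateful per-cell counting-flag scan by joining each column into a string, splitting it on 'X' and counting the segments that contain '..' (one substring test per segment).
-- outside the precondition, e.g. on countHeight(['.a', 'aXXa ', 'aX..X', 'XXaXX  '], 4): A returns 0, B raises IndexError
import Mathlib
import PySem

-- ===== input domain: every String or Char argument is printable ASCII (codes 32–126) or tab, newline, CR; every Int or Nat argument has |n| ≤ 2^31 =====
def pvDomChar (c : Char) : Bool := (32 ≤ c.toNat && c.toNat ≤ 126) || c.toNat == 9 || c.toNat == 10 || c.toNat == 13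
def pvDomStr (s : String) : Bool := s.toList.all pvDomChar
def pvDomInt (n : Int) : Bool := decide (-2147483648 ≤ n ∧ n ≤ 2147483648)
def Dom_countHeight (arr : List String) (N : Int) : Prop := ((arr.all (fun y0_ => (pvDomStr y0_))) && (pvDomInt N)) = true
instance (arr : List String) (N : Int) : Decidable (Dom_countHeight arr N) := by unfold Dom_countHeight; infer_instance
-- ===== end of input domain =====

-- B counts, per column, the 'X'-separated segments that contain two adjacent dots (split + substring test)
-- instead of A's stateful per-cell counting flag; objective: idiomatic. Pre_ excludes jagged grids on which
-- A only returns because short-circuit evaluation skips an out-of-range access of row 0 (B raises there).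


-- ===== PORT A =====
-- arr[j][i]; defaults unreachable under Pre_countHeight
def pvChAt (arr : List String) (j i : Int) : Char :=
  PySem.List.pyGetD (PySem.List.pyGetD arr j "").toList i ' '

def countHeight (arr : List String) (N : Int) : Int :=
  (PySem.List.pyRange 0 N 1).foldl (fun num i =>
    ((PySem.List.pyRange 1 N 1).foldl (fun (st : Bool × Int) j =>
        let counting := if st.1 = false ∧ pvChAt arr j i = 'X' then true else st.1
        if counting = true ∧ pvChAt arr j i = '.' ∧ pvChAt arr (j - 1) i = '.' then
          (false, st.2 + 1)
        else (counting, st.2))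
      (true, num)).2) 0

-- ===== PORT B =====
def countHeight_alt (arr : List String) (N : Int) : Int :=
  if N < 2 then 0
  else
    (PySem.List.pyRange 0 N 1).foldl (fun num i =>
      let col : List Char := (PySem.List.pyRange 0 N 1).map (fun j => pvChAt arr j i)
      num + ((PySem.Chars.splitOn col ['X']).map
        (fun seg => if PySem.Chars.isIn ['.', '.'] seg then (1 : Int) else 0)).sum) 0

-- ===== PRECONDITION & SPEC =====
-- Pre_ requires the full N×N grid to be present (N rows, each of length ≥ N). It excludes jagged grids
-- on which A happens to return only because 'and' short-circuiting skips the out-of-range access of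
-- row 0; B's column join accesses every cell and raises IndexError there.
def Pre_countHeight (arr : List String) (N : Int) : Prop :=
  N ≤ 1 ∨ (N ≤ PySem.List.len arr ∧ ∀ s ∈ arr.take N.toNat, N ≤ PySem.Str.len s)
instance (arr : List String) (N : Int) : Decidable (Pre_countHeight arr N) := by
  unfold Pre_countHeight; infer_instance

def pvWitness_countHeight : List String × Int := (["..", ".X"], 2)

def Spec_countHeight (arr : List String) (N : Int) (out : Int) : Prop := out = countHeight_alt arr N
instance (arr : List String) (N : Int) (out : Int) : Decidable (Spec_countHeight arr N out) := by unfold Spec_countHeight; infer_instance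

-- ===== CLAIM (what is proved, stated in full; the proofs are below) =====
def Claim_equal_countHeight : Prop := ∀ (arr : List String) (N : Int), Dom_countHeight arr N → Pre_countHeight arr N → Spec_countHeight arr N (countHeight arr N)

-- ===== LEMMAS AND PROOFS =====

-- A's inner loop as a structural scan over the column, carrying (previous char, counting flag)
def pvPairScan : Char → Bool → List Char → Int
  | _, _, [] => 0
  | prev, counting, x :: xs =>
    let c2 := if counting = false ∧ x = 'X' then true else counting
    if c2 = true ∧ x = '.' ∧ prev = '.' then 1 + pvPairScan x false xs
    else pvPairScan x c2 xs

-- B's per-column count, over an explicit segment list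
def pvCnt (segs : List (List Char)) : Int :=
  (segs.map (fun seg => if PySem.Chars.isIn ['.', '.'] seg then (1 : Int) else 0)).sum

lemma pvGo_eq (fuel : Nat) : ∀ (l cur : List Char) (acc : List (List Char)) (_ : l.length ≤ fuel),
    PySem.Chars.splitOn.go ['X'] fuel l cur acc
      = acc.reverse ++ List.modifyHead (cur.reverse ++ ·) (l.splitOnP (· == 'X')) := by
  induction fuel with
  | zero =>
    intro l cur acc hf
    have hl : l = [] := List.eq_nil_of_length_eq_zero (Nat.le_zero.mp hf)
    subst hl
    simp [PySem.Chars.splitOn.go, List.splitOnP_nil]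
  | succ n ih =>
    intro l cur acc hf
    cases l with
    | nil => simp [PySem.Chars.splitOn.go, List.splitOnP_nil]
    | cons c rest =>
      obtain ⟨s0, r, hs⟩ : ∃ s0 r, rest.splitOnP (· == 'X') = s0 :: r := by
        cases h : rest.splitOnP (· == 'X') with
        | nil => exact absurd h (List.splitOnP_ne_nil _ _)
        | cons s0 r => exact ⟨s0, r, rfl⟩
      rw [PySem.Chars.splitOn.go]
      by_cases hc : c = 'X'
      · subst hc
        simp only [List.isPrefixOf, BEq.rfl, Bool.and_true, if_pos]
        rw [ih _ _ _ (by simpa using Nat.le_of_succ_le_succ hf)]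
        simp [List.splitOnP_cons, hs]
      · have hpre : (['X'].isPrefixOf (c :: rest)) = false := by
          simp [List.isPrefixOf]
          exact fun h => absurd h.symm hc
        rw [hpre]
        simp only [Bool.false_eq_true, if_false]
        rw [ih _ _ _ (by simpa using Nat.le_of_succ_le_succ hf)]
        simp [List.splitOnP_cons, hs, hc]


lemma pvSplit_eq (l : List Char) :
    PySem.Chars.splitOn l ['X'] = l.splitOnP (· == 'X') := by
  rw [PySem.Chars.splitOn, pvGo_eq _ _ _ _ (Nat.le_succ _)]
  cases h : l.splitOnP (· == 'X') with
  | nil => exact absurd h (List.splitOnP_ne_nil _ _)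
  | cons s0 r => simp


lemma pvNoPair_nil : PySem.Chars.isIn ['.', '.'] ([] : List Char) = false := by
  rw [← Bool.not_eq_true, PySem.Chars.isIn_iff_infix]; intro h; simpa using h.length_le


lemma pvNoPair_short (c : Char) : PySem.Chars.isIn ['.', '.'] [c] = false := by
  rw [← Bool.not_eq_true, PySem.Chars.isIn_iff_infix]; intro h; simpa using h.length_le


lemma pvPair_dots (s : List Char) : PySem.Chars.isIn ['.', '.'] ('.' :: '.' :: s) = true := by
  rw [PySem.Chars.isIn_iff_infix]; exact ⟨[], s, rfl⟩


lemma pvPair_cons_cons (a b : Char) (s : List Char) (h : ¬(b = '.' ∧ a = '.')) :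
    PySem.Chars.isIn ['.', '.'] (a :: b :: s) = PySem.Chars.isIn ['.', '.'] (b :: s) := by
  rcases hb : PySem.Chars.isIn ['.', '.'] (b :: s) with _ | _
  · rw [← Bool.not_eq_true, PySem.Chars.isIn_iff_infix]
    rw [← Bool.not_eq_true, PySem.Chars.isIn_iff_infix] at hb
    intro hin
    rcases (List.infix_cons_iff).mp hin with hpre | hinf
    · rcases List.cons_prefix_cons.mp hpre with ⟨ha, hpre2⟩
      rcases List.cons_prefix_cons.mp hpre2 with ⟨hb2, _⟩
      exact h ⟨hb2.symm, ha.symm⟩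
    · exact hb hinf
  · rw [PySem.Chars.isIn_iff_infix] at hb ⊢
    exact hb.trans (List.suffix_cons a (b :: s)).isInfix


lemma pvSplit_head (xs : List Char) : ∃ s0 r, xs.splitOnP (· == 'X') = s0 :: r := by
  cases h : xs.splitOnP (· == 'X') with
  | nil => exact absurd h (List.splitOnP_ne_nil _ _)
  | cons s0 r => exact ⟨s0, r, rfl⟩


lemma pvScan_eq (l : List Char) : ∀ (prev : Char),
    (pvPairScan prev true l = pvCnt ((prev :: l).splitOnP (· == 'X')))
     ∧ (prev ≠ 'X' → pvPairScan prev false l = pvCnt (((prev :: l).splitOnP (· == 'X')).tail)) := by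
  induction l with
  | nil =>
    intro prev
    constructor
    · by_cases hp : prev = 'X'
      · subst hp
        simp [pvPairScan, pvCnt, List.splitOnP_cons, List.splitOnP_nil, pvNoPair_nil]
      · simp [pvPairScan, pvCnt, List.splitOnP_cons, List.splitOnP_nil, hp, pvNoPair_short]
    · intro hp
      simp [pvPairScan, pvCnt, List.splitOnP_cons, List.splitOnP_nil, hp]
  | cons x xs ih =>
    intro prev
    obtain ⟨s0, r, hs⟩ := pvSplit_head xs
    constructor
    · by_cases hx : x = '.' ∧ prev = '.'
      · obtain ⟨hx1, hp1⟩ := hx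
        subst hx1; subst hp1
        have h2 := (ih '.').2 (by decide)
        simp only [List.splitOnP_cons, hs] at h2
        simp [pvPairScan, h2, pvCnt, List.splitOnP_cons, hs, pvPair_dots]
      · -- counting stays true, no pair counted
        by_cases hpx : prev = 'X'
        · subst hpx
          have h1 := (ih x).1
          simp only [List.splitOnP_cons, hs] at h1
          simp only [pvPairScan]
          by_cases hxX : x = 'X' <;>
            simp [hxX, pvCnt, List.splitOnP_cons, hs, pvNoPair_nil] at h1 ⊢ <;>
            omega
        · by_cases hxX : x = 'X'
          · subst hxX
            have h1 := (ih 'X').1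
            simp only [List.splitOnP_cons, hs] at h1
            simp only [pvPairScan]
            simp [h1, pvCnt, List.splitOnP_cons, hs, pvNoPair_nil, pvNoPair_short, hpx]
          · have h1 := (ih x).1
            simp only [List.splitOnP_cons, hs] at h1
            simp only [pvPairScan]
            simp [hx, h1, pvCnt, List.splitOnP_cons, hs, hxX, hpx,
                  pvPair_cons_cons prev x s0 hx]
    · intro hpx
      by_cases hxX : x = 'X'
      · subst hxX
        have h1 := (ih 'X').1
        simp only [List.splitOnP_cons, hs] at h1
        simp only [pvPairScan]
        simp [h1, pvCnt, List.splitOnP_cons, hs, hpx, pvNoPair_nil]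
      · have h2 := (ih x).2 hxX
        simp only [List.splitOnP_cons, hs] at h2
        simp only [pvPairScan]
        simp [h2, pvCnt, List.splitOnP_cons, hs, hpx, hxX]


lemma pvInner (f : Int → Char) (N : Int) : ∀ (k : Nat) (a : Int) (st : Bool × Int),
    (N - a).toNat = k →
    ((PySem.List.pyRange a N 1).foldl (fun (st : Bool × Int) j =>
        let counting := if st.1 = false ∧ f j = 'X' then true else st.1
        if counting = true ∧ f j = '.' ∧ f (j - 1) = '.' then (false, st.2 + 1)
        else (counting, st.2)) st).2
      = st.2 + pvPairScan (f (a - 1)) st.1 ((PySem.List.pyRange a N 1).map f) := by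
  intro k
  induction k with
  | zero =>
    intro a st hk
    rw [PySem.List.pyRange_one_eq_nil (by omega)]
    simp [pvPairScan]
  | succ k ih =>
    intro a st hk
    rw [PySem.List.pyRange_one_cons (by omega)]
    simp only [List.foldl_cons, List.map_cons]
    rw [ih (a + 1) _ (by omega)]
    simp only [pvPairScan, show a + 1 - 1 = a from by ring]
    split_ifs with h1 <;> simp <;> omega


-- ===== VERDICT (by name: the statement is the Claim_ definition above) =====
theorem countHeight_spec : Claim_equal_countHeight := by
  intro arr N _ _
  unfold Spec_countHeight countHeight countHeight_alt
  by_cases hN : N < 2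
  · rw [if_pos hN]
    by_cases h0 : N ≤ 0
    · rw [PySem.List.pyRange_one_eq_nil (by omega)]
      simp
    · have h1 : N = 1 := by omega
      subst h1
      rw [show PySem.List.pyRange 0 1 1 = [0] from by decide]
      simp [show PySem.List.pyRange 1 1 1 = ([] : List Int) from by decide]
  · rw [if_neg hN]
    have hb : ∀ (num i : Int),
        ((PySem.List.pyRange 1 N 1).foldl (fun (st : Bool × Int) j =>
            let counting := if st.1 = false ∧ pvChAt arr j i = 'X' then true else st.1
            if counting = true ∧ pvChAt arr j i = '.' ∧ pvChAt arr (j - 1) i = '.' then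
              (false, st.2 + 1)
            else (counting, st.2)) (true, num)).2
          = num + ((PySem.Chars.splitOn ((PySem.List.pyRange 0 N 1).map
                (fun j => pvChAt arr j i)) ['X']).map
              (fun seg => if PySem.Chars.isIn ['.', '.'] seg then (1 : Int) else 0)).sum := by
      intro num i
      have hcol : (PySem.List.pyRange 0 N 1).map (fun j => pvChAt arr j i)
          = pvChAt arr 0 i :: (PySem.List.pyRange 1 N 1).map (fun j => pvChAt arr j i) := by
        rw [PySem.List.pyRange_one_cons (by omega)]
        simp
      rw [pvInner (fun j => pvChAt arr j i) N (N - 1).toNat 1 (true, num) (by omega)]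
      rw [pvSplit_eq, hcol]
      have hmain := (pvScan_eq ((PySem.List.pyRange 1 N 1).map (fun j => pvChAt arr j i))
        (pvChAt arr 0 i)).1
      norm_num
      rw [hmain]
      simp [pvCnt]
    have hfun : (fun (num i : Int) =>
        ((PySem.List.pyRange 1 N 1).foldl (fun (st : Bool × Int) j =>
            let counting := if st.1 = false ∧ pvChAt arr j i = 'X' then true else st.1
            if counting = true ∧ pvChAt arr j i = '.' ∧ pvChAt arr (j - 1) i = '.' then
              (false, st.2 + 1)
            else (counting, st.2)) (true, num)).2)
        = (fun (num i : Int) =>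
          num + ((PySem.Chars.splitOn ((PySem.List.pyRange 0 N 1).map
                (fun j => pvChAt arr j i)) ['X']).map
              (fun seg => if PySem.Chars.isIn ['.', '.'] seg then (1 : Int) else 0)).sum) := by
      funext num i
      exact hb num i
    rw [hfun]
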